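-- pv_equiv track=rewrite | github.com/redhat-documentation/redhat-docs-agent-tools | plugins/cqa-tools/skills/cqa-assess/scripts/check-content-types.py | parse_code_block_lines
-- ===== SOURCE A (Python) =====
-- def parse_code_block_lines(lines):
--     """Return a set of line indices inside code/literal/example blocks."""
--     code_lines = set()
--     in_source = False
--     in_literal = False
--     for i, line in enumerate(lines):
--         stripped = line.strip()
--         if stripped.startswith("----") and len(stripped) >= 4 and all(c == "-" for c in stripped):
--             if in_source:
--                 code_lines.add(i)
--             in_source = not in_source
--             if in_source:
--                 code_lines.add(i)
--             continue
--         if stripped.startswith("....") and len(stripped) >= 4 and all(c == "." for c in stripped):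
--             if in_literal:
--                 code_lines.add(i)
--             in_literal = not in_literal
--             if in_literal:
--                 code_lines.add(i)
--             continue
--         if in_source or in_literal:
--             code_lines.add(i)
--     return code_lines
-- ===== SOURCE B (Python) =====
-- def parse_code_block_lines(lines):
--     """Return a set of line indices inside code/literal/example blocks."""
--     n = len(lines)
--
--     def fence_indices(ch):
--         idxs = []
--         for i, line in enumerate(lines):
--             s = line.strip()
--             if len(s) >= 4 and all(c == ch for c in s):
--                 idxs.append(i)
--         return idxs
--
--     def intervals(idxs):
--         ivs = []
--         while len(idxs) >= 2:
--             ivs.append((idxs[0], idxs[1]))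
--             idxs = idxs[2:]
--         if idxs:
--             ivs.append((idxs[0], n - 1))
--         return ivs
--
--     ivs = intervals(fence_indices("-")) + intervals(fence_indices("."))
--     return {i for i in range(n) if any(a <= i <= b for a, b in ivs)}
-- ===== Notes on version B (the rewrite author's own statement) =====
-- stated objective: alternative
-- what changed: Replaces the stateful single-pass toggle automaton with a declarative computation: collect the dash-fence and dot-fence line indices, pair them up into closed intervals (an unmatched last opener extends to the final line), and return every index covered by some interval.
import Mathlib
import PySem

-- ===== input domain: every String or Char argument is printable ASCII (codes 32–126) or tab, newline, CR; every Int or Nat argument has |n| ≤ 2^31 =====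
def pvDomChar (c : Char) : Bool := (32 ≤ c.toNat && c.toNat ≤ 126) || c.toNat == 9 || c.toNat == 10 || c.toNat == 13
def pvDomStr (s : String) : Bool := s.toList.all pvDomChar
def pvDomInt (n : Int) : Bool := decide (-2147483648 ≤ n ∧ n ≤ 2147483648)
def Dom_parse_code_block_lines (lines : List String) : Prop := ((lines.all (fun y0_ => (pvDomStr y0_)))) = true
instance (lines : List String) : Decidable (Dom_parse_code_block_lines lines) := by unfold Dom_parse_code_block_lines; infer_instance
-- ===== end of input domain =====

-- B replaces A's stateful toggle automaton by pairing fence indices into intervals and taking every covered index (alternative decomposition, same result).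

-- ===== PORT A =====
-- loop body of A's 'for i, line in enumerate(lines)' over state (code_lines, in_source, in_literal)
def pvStepA (st : PySem.Set Int × Bool × Bool) (p : Int × String) : PySem.Set Int × Bool × Bool :=
  let code := st.1
  let inS := st.2.1
  let inL := st.2.2
  let stripped := PySem.Str.strip p.2
  if PySem.Str.startswith stripped "----" && decide (4 ≤ PySem.Str.len stripped)
      && stripped.toList.all (fun c => c == '-') then
    let code1 := if inS then PySem.Set.add code p.1 else code
    let inS' := !inS
    let code2 := if inS' then PySem.Set.add code1 p.1 else code1
    (code2, inS', inL)
  else if PySem.Str.startswith stripped "...." && decide (4 ≤ PySem.Str.len stripped)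
      && stripped.toList.all (fun c => c == '.') then
    let code1 := if inL then PySem.Set.add code p.1 else code
    let inL' := !inL
    let code2 := if inL' then PySem.Set.add code1 p.1 else code1
    (code2, inS, inL')
  else if inS || inL then (PySem.Set.add code p.1, inS, inL)
  else (code, inS, inL)

def parse_code_block_lines (lines : List String) : List Int :=
  ((PySem.List.enumerate lines).foldl pvStepA (PySem.Set.empty, false, false)).1

-- ===== PORT B =====
def pvIsFence (ch : Char) (line : String) : Bool :=
  let s := PySem.Str.strip line
  decide (4 ≤ PySem.Str.len s) && s.toList.all (fun c => c == ch)

def pvFenceIndices (ch : Char) (lines : List String) : List Int :=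
  (PySem.List.enumerate lines).foldl
    (fun idxs p => if pvIsFence ch p.2 then idxs ++ [p.1] else idxs) []

def pvIntervals (n : Int) : List Int → List (Int × Int)
  | a :: b :: t => (a, b) :: pvIntervals n t
  | [a] => [(a, n - 1)]
  | [] => []

def parse_code_block_lines_alt (lines : List String) : List Int :=
  let n : Int := lines.length
  let ivs := pvIntervals n (pvFenceIndices '-' lines) ++ pvIntervals n (pvFenceIndices '.' lines)
  PySem.Set.ofList ((PySem.List.pyRange 0 n).filter
    (fun i => ivs.any (fun ab => decide (ab.1 ≤ i) && decide (i ≤ ab.2))))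

-- ===== PRECONDITION & SPEC =====
def Spec_parse_code_block_lines (lines : List String) (out : List Int) : Prop := out = parse_code_block_lines_alt lines
instance (lines : List String) (out : List Int) : Decidable (Spec_parse_code_block_lines lines out) := by unfold Spec_parse_code_block_lines; infer_instance

-- ===== CLAIM (what is proved, stated in full; the proofs are below) =====
def Claim_equal_parse_code_block_lines : Prop := ∀ (lines : List String), Dom_parse_code_block_lines lines → Spec_parse_code_block_lines lines (parse_code_block_lines lines)

-- ===== LEMMAS AND PROOFS =====

-- a string of length >= 4 made only of ch starts with [ch,ch,ch,ch]
theorem pv_prefix_of_all (ch : Char) (cs : List Char) (h4 : 4 ≤ cs.length)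
    (hall : cs.all (fun c => c == ch) = true) : List.isPrefixOf [ch, ch, ch, ch] cs = true := by
  match cs, h4 with
  | c1 :: c2 :: c3 :: c4 :: rest, _ =>
    simp only [List.all_cons, Bool.and_eq_true, beq_iff_eq] at hall
    obtain ⟨h1, h2, h3, h4', _⟩ := hall
    subst h1 h2 h3 h4'
    simp [List.isPrefixOf]

theorem pv_chars_cond (ch : Char) (cs : List Char) :
    (List.isPrefixOf [ch, ch, ch, ch] cs && decide ((4:Int) ≤ cs.length) && cs.all (fun c => c == ch)) =
    (decide ((4:Int) ≤ cs.length) && cs.all (fun c => c == ch)) := by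
  by_cases h4 : (4 : Int) ≤ (cs.length : Int)
  · by_cases hall : cs.all (fun c => c == ch) = true
    · simp [pv_prefix_of_all ch cs (by exact_mod_cast h4) hall, h4, hall]
    · simp [hall]
  · simp [h4]

-- A's fence test equals B's pvIsFence (the startswith conjunct is redundant)
theorem pv_condA_eq (ch : Char) (line : String) (lit : String) (hlit : lit.toList = [ch, ch, ch, ch]) :
    (PySem.Str.startswith (PySem.Str.strip line) lit && decide (4 ≤ PySem.Str.len (PySem.Str.strip line))
      && (PySem.Str.strip line).toList.all (fun c => c == ch)) =
    (decide (4 ≤ PySem.Str.len (PySem.Str.strip line)) && (PySem.Str.strip line).toList.all (fun c => c == ch)) := by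
  simp only [PySem.Str.startswith_eq, PySem.Str.len_eq, PySem.Str.toList_strip, hlit,
    PySem.Chars.startswith]
  exact pv_chars_cond ch (PySem.Chars.strip line.toList)

-- a line cannot be both a dash fence and a dot fence
theorem pv_fence_disjoint (line : String) (h : pvIsFence '-' line = true) : pvIsFence '.' line = false := by
  unfold pvIsFence at *
  simp only [PySem.Str.len_eq, PySem.Str.toList_strip, Bool.and_eq_true, decide_eq_true_eq] at *
  obtain ⟨h4, hall⟩ := h
  match hcs : PySem.Chars.strip line.toList, h4 with
  | c :: rest, _ =>
    rw [hcs] at hall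
    simp only [List.all_cons, Bool.and_eq_true, beq_iff_eq] at hall
    simp [hall.1]

-- A's step in pvIsFence form
theorem pvStepA_eq (code : PySem.Set Int) (inS inL : Bool) (i : Int) (l : String) :
    pvStepA (code, inS, inL) (i, l) =
      if pvIsFence '-' l then (PySem.Set.add code i, !inS, inL)
      else if pvIsFence '.' l then (PySem.Set.add code i, inS, !inL)
      else if inS || inL then (PySem.Set.add code i, inS, inL)
      else (code, inS, inL) := by
  simp only [pvStepA, pvIsFence]
  rw [pv_condA_eq '-' l "----" (by decide), pv_condA_eq '.' l "...." (by decide)]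
  by_cases h1 : (decide (4 ≤ PySem.Str.len (PySem.Str.strip l))
      && (PySem.Str.strip l).toList.all (fun c => c == '-')) = true <;>
    by_cases h2 : (decide (4 ≤ PySem.Str.len (PySem.Str.strip l))
      && (PySem.Str.strip l).toList.all (fun c => c == '.')) = true <;>
    cases inS <;> cases inL <;> simp [h1, h2]

theorem pv_parity_succ (c : Nat) : decide ((c + 1) % 2 = 1) = !decide (c % 2 = 1) := by
  rcases Nat.mod_two_eq_zero_or_one c with h | h <;> simp [Nat.add_mod, h]

-- re-indexing an existential over positions of a cons cell
theorem pv_shift (s j : Int) (m : Nat) (A B : Prop) (C0 : Nat → Prop) (Ct : Nat → Prop)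
    (h0 : C0 0 ↔ B) (hs : ∀ k, k < m → (Ct k ↔ C0 (k + 1))) :
    ((A ∨ B ∧ j = s) ∨ ∃ k : Nat, k < m ∧ j = (s + 1) + k ∧ Ct k) ↔
      (A ∨ ∃ k : Nat, k < m + 1 ∧ j = s + k ∧ C0 k) := by
  constructor
  · rintro ((hA | ⟨hb, hj⟩) | ⟨k, hk, hj, hc⟩)
    · exact Or.inl hA
    · exact Or.inr ⟨0, by omega, by simpa using hj, h0.mpr hb⟩
    · exact Or.inr ⟨k + 1, by omega, by push_cast at hj ⊢; omega, (hs k hk).mp hc⟩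
  · rintro (hA | ⟨k, hk, hj, hc⟩)
    · exact Or.inl (Or.inl hA)
    · cases k with
      | zero => exact Or.inl (Or.inr ⟨h0.mp hc, by simpa using hj⟩)
      | succ k => exact Or.inr ⟨k, by omega, by push_cast at hj ⊢; omega, (hs k (by omega)).mpr hc⟩

-- the condition under which A's loop records position k
def pvCond (lines : List String) (inS inL : Bool) (k : Nat) : Prop :=
  pvIsFence '-' (lines.getD k "") = true ∨ pvIsFence '.' (lines.getD k "") = true
    ∨ (inS ^^ decide (((lines.take k).countP (pvIsFence '-')) % 2 = 1)) = true
    ∨ (inL ^^ decide (((lines.take k).countP (pvIsFence '.')) % 2 = 1)) = true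

set_option maxHeartbeats 1000000 in
theorem pv_foldA_mem (rest : List String) : ∀ (s : Int) (code : PySem.Set Int) (inS inL : Bool) (j : Int),
    (j ∈ ((PySem.List.enumerate rest s).foldl pvStepA (code, inS, inL)).1 ↔
      j ∈ code ∨ ∃ k : Nat, k < rest.length ∧ j = s + k ∧ pvCond rest inS inL k) := by
  induction rest with
  | nil => intro s code inS inL j; simp [PySem.List.enumerate]
  | cons l t ih =>
    intro s code inS inL j
    rw [PySem.List.enumerate_cons, List.foldl_cons, pvStepA_eq]
    simp only [List.length_cons]
    by_cases hd : pvIsFence '-' l = true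
    · have ho : pvIsFence '.' l = false := pv_fence_disjoint l hd
      have h0 : pvCond (l :: t) inS inL 0 ↔ True := by simp [pvCond, hd]
      have hs : ∀ k, k < t.length → (pvCond t (!inS) inL k ↔ pvCond (l :: t) inS inL (k + 1)) := by
        intro k hk
        simp only [pvCond, List.getD_cons_succ, List.take_succ_cons, List.countP_cons, hd, ho,
          if_true, if_false, Bool.false_eq_true, Nat.add_zero, pv_parity_succ, Bool.not_xor,
          Bool.xor_not]
      have hshift := pv_shift s j t.length (j ∈ code) True
        (pvCond (l :: t) inS inL) (pvCond t (!inS) inL) h0 hs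
      simp only [hd, reduceIte]
      exact (ih (s+1) (PySem.Set.add code s) (!inS) inL j).trans
        (Iff.trans (by simp only [PySem.Set.mem_add, true_and]) hshift)
    · have hd' : pvIsFence '-' l = false := by simpa using hd
      by_cases ho : pvIsFence '.' l = true
      · have h0 : pvCond (l :: t) inS inL 0 ↔ True := by simp [pvCond, ho]
        have hs : ∀ k, k < t.length → (pvCond t inS (!inL) k ↔ pvCond (l :: t) inS inL (k + 1)) := by
          intro k hk
          simp only [pvCond, List.getD_cons_succ, List.take_succ_cons, List.countP_cons, hd', ho,
            if_true, if_false, Bool.false_eq_true, Nat.add_zero, pv_parity_succ, Bool.not_xor,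
            Bool.xor_not]
        have hshift := pv_shift s j t.length (j ∈ code) True
          (pvCond (l :: t) inS inL) (pvCond t inS (!inL)) h0 hs
        simp only [hd', ho, Bool.false_eq_true, reduceIte]
        exact (ih (s+1) (PySem.Set.add code s) inS (!inL) j).trans
          (Iff.trans (by simp only [PySem.Set.mem_add, true_and]) hshift)
      · have ho' : pvIsFence '.' l = false := by simpa using ho
        have h0 : pvCond (l :: t) inS inL 0 ↔ (inS || inL) = true := by
          simp [pvCond, hd', ho', Bool.or_eq_true]
        have hs : ∀ k, k < t.length → (pvCond t inS inL k ↔ pvCond (l :: t) inS inL (k + 1)) := by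
          intro k hk
          simp only [pvCond, List.getD_cons_succ, List.take_succ_cons, List.countP_cons, hd', ho',
            if_false, Bool.false_eq_true, Nat.add_zero]
        have hshift := pv_shift s j t.length (j ∈ code) ((inS || inL) = true)
          (pvCond (l :: t) inS inL) (pvCond t inS inL) h0 hs
        by_cases hio : (inS || inL) = true
        · simp only [hd', ho', Bool.false_eq_true, hio, reduceIte]
          exact (ih (s+1) (PySem.Set.add code s) inS inL j).trans
            (Iff.trans (by simp only [PySem.Set.mem_add, hio, eq_self_iff_true, true_and]) hshift)
        · have hio' : (inS || inL) = false := by simpa using hio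
          simp only [hd', ho', hio', Bool.false_eq_true, reduceIte]
          exact (ih (s+1) code inS inL j).trans
            (Iff.trans (by simp only [hio', Bool.false_eq_true, false_and, or_false]) hshift)

theorem pv_add_append (s : PySem.Set Int) (x : Int) (h : x ∉ s) : PySem.Set.add s x = s ++ [x] := by
  simp only [PySem.Set.add, PySem.Set.contains]
  simp [List.contains_eq_mem, h]

theorem pv_add_pairwise (code : PySem.Set Int) (s : Int) (h : code.Pairwise (· < ·))
    (hlt : ∀ x ∈ code, x < s) :
    (PySem.Set.add code s).Pairwise (· < ·) ∧ ∀ x ∈ PySem.Set.add code s, x < s + 1 := by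
  have hn : s ∉ code := fun hm => absurd (hlt s hm) (lt_irrefl s)
  rw [pv_add_append code s hn]
  constructor
  · rw [List.pairwise_append]
    exact ⟨h, List.pairwise_singleton _ s, fun x hx y hy => by simp at hy; subst hy; exact hlt x hx⟩
  · intro x hx
    rcases List.mem_append.mp hx with hx | hx
    · have := hlt x hx; omega
    · simp at hx; omega

theorem pv_stepA_cases (st : PySem.Set Int × Bool × Bool) (p : Int × String) :
    (pvStepA st p).1 = st.1 ∨ (pvStepA st p).1 = PySem.Set.add st.1 p.1 := by
  obtain ⟨code, inS, inL⟩ := st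
  obtain ⟨i, l⟩ := p
  rw [pvStepA_eq]
  split_ifs <;> simp

theorem pv_foldA_sorted (rest : List String) : ∀ (s : Int) (code : PySem.Set Int) (inS inL : Bool),
    code.Pairwise (· < ·) → (∀ x ∈ code, x < s) →
    ((PySem.List.enumerate rest s).foldl pvStepA (code, inS, inL)).1.Pairwise (· < ·) := by
  induction rest with
  | nil => intro s code inS inL h _; simpa [PySem.List.enumerate] using h
  | cons l t ih =>
    intro s code inS inL h hlt
    rw [PySem.List.enumerate_cons, List.foldl_cons]
    rcases hst : pvStepA (code, inS, inL) (s, l) with ⟨code', inS', inL'⟩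
    have hc := pv_stepA_cases (code, inS, inL) (s, l)
    rw [hst] at hc
    simp only at hc
    rcases hc with hc | hc
    · exact ih (s+1) code' inS' inL' (hc ▸ h) (fun x hx => by have := hlt x (hc ▸ hx); omega)
    · obtain ⟨hp, hb⟩ := pv_add_pairwise code s h hlt
      exact ih (s+1) code' inS' inL' (hc ▸ hp) (fun x hx => hb x (hc ▸ hx))

-- B's fence-index list as enumerate/filter/map
def pvEfm (ch : Char) (lines : List String) (s : Int) : List Int :=
  ((PySem.List.enumerate lines s).filter (fun p => pvIsFence ch p.2)).map (fun p => p.1)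

theorem pvFenceIndices_eq (ch : Char) (lines : List String) :
    pvFenceIndices ch lines = pvEfm ch lines 0 := by
  unfold pvFenceIndices pvEfm
  have h := PySem.List.foldl_append_if (fun q : Int × String => pvIsFence ch q.2)
    (fun q : Int × String => q.1) (PySem.List.enumerate lines) []
  simpa using h

theorem pvEfm_nil (ch : Char) (s : Int) : pvEfm ch [] s = [] := by
  simp [pvEfm, PySem.List.enumerate]

theorem pvEfm_cons (ch : Char) (l : String) (t : List String) (s : Int) :
    pvEfm ch (l :: t) s = (if pvIsFence ch l then [s] else []) ++ pvEfm ch t (s + 1) := by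
  unfold pvEfm
  rw [PySem.List.enumerate_cons, List.filter_cons]
  by_cases h : pvIsFence ch l = true <;> simp [h]

theorem pvEfm_mem (ch : Char) (lines : List String) : ∀ (s : Int) (x : Int),
    (x ∈ pvEfm ch lines s ↔
      ∃ k : Nat, k < lines.length ∧ x = s + k ∧ pvIsFence ch (lines.getD k "") = true) := by
  induction lines with
  | nil => intro s x; simp [pvEfm_nil]
  | cons l t ih =>
    intro s x
    rw [pvEfm_cons, List.mem_append]
    constructor
    · rintro (hx | hx)
      · by_cases h : pvIsFence ch l = true
        · simp [h] at hx
          exact ⟨0, by simp, by simpa using hx, by simpa using h⟩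
        · simp [h] at hx
      · obtain ⟨k, hk, hxk, hf⟩ := (ih (s+1) x).mp hx
        exact ⟨k + 1, by simp; omega, by push_cast at hxk ⊢; omega, by simpa using hf⟩
    · rintro ⟨k, hk, hxk, hf⟩
      cases k with
      | zero =>
        left
        simp only [List.getD_cons_zero] at hf
        simp [hf]
        simpa using hxk
      | succ k =>
        right
        exact (ih (s+1) x).mpr ⟨k, by simp at hk; omega, by push_cast at hxk ⊢; omega, by simpa using hf⟩

theorem pvEfm_sorted (ch : Char) (lines : List String) : ∀ (s : Int),
    (pvEfm ch lines s).Pairwise (· < ·) ∧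
      ∀ x ∈ pvEfm ch lines s, s ≤ x ∧ x < s + lines.length := by
  induction lines with
  | nil => intro s; simp [pvEfm_nil]
  | cons l t ih =>
    intro s
    obtain ⟨hp, hb⟩ := ih (s + 1)
    rw [pvEfm_cons]
    have hb' : ∀ x ∈ pvEfm ch t (s+1), s ≤ x ∧ x < s + (l :: t).length := by
      intro x hx
      have := hb x hx
      simp only [List.length_cons]
      push_cast
      omega
    by_cases h : pvIsFence ch l = true
    · simp only [h, reduceIte, List.singleton_append]
      refine ⟨List.pairwise_cons.mpr ⟨fun x hx => by have := hb x hx; omega, hp⟩, ?_⟩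
      intro x hx
      rcases List.mem_cons.mp hx with rfl | hx
      · simp only [List.length_cons]; push_cast; omega
      · exact hb' x hx
    · simp only [h, Bool.false_eq_true, reduceIte, List.nil_append]
      exact ⟨hp, hb'⟩

theorem pvEfm_count (ch : Char) (lines : List String) : ∀ (s : Int) (k : Nat),
    (pvEfm ch lines s).countP (fun x => decide (x < s + k)) =
      (lines.take k).countP (pvIsFence ch) := by
  induction lines with
  | nil => intro s k; simp [pvEfm_nil]
  | cons l t ih =>
    intro s k
    rw [pvEfm_cons]
    cases k with
    | zero =>
      simp only [List.take_zero, List.countP_nil]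
      rw [List.countP_eq_zero]
      intro x hx
      have hxs : s ≤ x := by
        rcases List.mem_append.mp hx with hx | hx
        · by_cases h : pvIsFence ch l = true
          · simp [h] at hx; omega
          · simp [h] at hx
        · have := (pvEfm_sorted ch t (s+1)).2 x hx; omega
      simp only [decide_eq_true_eq]
      push_cast
      omega
    | succ k =>
      rw [List.countP_append]
      have h2 : (pvEfm ch t (s+1)).countP (fun x => decide (x < s + (k+1:Nat))) =
          (pvEfm ch t (s+1)).countP (fun x => decide (x < (s+1) + (k:Nat))) := by
        apply List.countP_congr
        intro a _
        simp only [decide_eq_true_eq]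
        constructor <;> intro <;> push_cast at * <;> omega
      rw [h2, ih (s+1) k, List.take_succ_cons, List.countP_cons]
      by_cases h : pvIsFence ch l = true
      · simp only [h, reduceIte, List.countP_cons, List.countP_nil, h, if_true]
        have : (s < s + ((k:Nat)+1:Nat) : Prop) := by push_cast; omega
        simp [this]
        omega
      · simp [h]

theorem pv_intervals_cover (n : Int) : ∀ (F : List Int), F.Pairwise (· < ·) → (∀ x ∈ F, x < n) →
    ∀ (j : Int), j < n →
    ((pvIntervals n F).any (fun ab => decide (ab.1 ≤ j) && decide (j ≤ ab.2)) = true ↔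
      j ∈ F ∨ F.countP (fun x => decide (x < j)) % 2 = 1) := by
  intro F
  induction F using pvIntervals.induct with
  | case1 a b t ih =>
    intro hs hb j hj
    obtain ⟨hab, hsp⟩ := List.pairwise_cons.mp hs
    obtain ⟨hbt, ht⟩ := List.pairwise_cons.mp hsp
    have hab' : a < b := hab b (by simp)
    have hat : ∀ x ∈ t, a < x := fun x hx => lt_trans hab' (hbt x hx)
    rw [show pvIntervals n (a :: b :: t) = (a, b) :: pvIntervals n t from rfl, List.any_cons]
    have ihj := ih ht (fun x hx => hb x (by simp [hx])) j hj
    simp only [List.countP_cons, List.mem_cons]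
    by_cases h1 : j < a
    · have : ¬ (decide (a ≤ j) && decide (j ≤ b)) = true := by simp; omega
      simp only [Bool.or_eq_true, this, false_or] at *
      rw [ihj]
      have hna : ¬ j = a := by omega
      have hnb : ¬ j = b := by omega
      have hnt : j ∉ t := fun hm => absurd (hat j hm) (by omega)
      have hct : t.countP (fun x => decide (x < j)) = 0 := by
        rw [List.countP_eq_zero]; intro x hx; simp; have := hat x hx; omega
      simp [hna, hnb, hnt, hct]
      simp [show ¬ b < j from by omega, show ¬ a < j from by omega]
    · by_cases h2 : j ≤ b
      · have : (decide (a ≤ j) && decide (j ≤ b)) = true := by simp; omega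
        simp only [this, Bool.true_or, true_iff]
        by_cases hja : j = a
        · exact Or.inl (Or.inl hja)
        by_cases hjb : j = b
        · exact Or.inl (Or.inr (Or.inl hjb))
        · right
          have hct : t.countP (fun x => decide (x < j)) = 0 := by
            rw [List.countP_eq_zero]; intro x hx; simp; have := hbt x hx; omega
          have ha' : (decide (a < j)) = true := by simp; omega
          have hb'' : (decide (b < j)) = false := by simp; omega
          simp [ha', hb'', hct]
      · have hno : ¬ (decide (a ≤ j) && decide (j ≤ b)) = true := by simp; omega
        simp only [Bool.or_eq_true, hno, false_or]
        rw [ihj]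
        have hna : ¬ j = a := by omega
        have hnb : ¬ j = b := by omega
        have ha' : (decide (a < j)) = true := by simp; omega
        have hb'' : (decide (b < j)) = true := by simp; omega
        simp [hna, hnb, ha', hb'']
        constructor
        · rintro (h | h); exacts [Or.inl h, Or.inr (by omega)]
        · rintro (h | h); exacts [Or.inl h, Or.inr (by omega)]
  | case2 a =>
    intro hs hb j hj
    have hbn : a < n := hb a (by simp)
    rw [show pvIntervals n [a] = [(a, n - 1)] from rfl]
    simp only [List.any_cons, List.any_nil, Bool.or_false, List.mem_singleton,
      List.countP_cons, List.countP_nil]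
    constructor
    · intro h
      simp at h
      by_cases hja : j = a
      · exact Or.inl hja
      · right; have : a < j := by omega
        simp [this]
    · rintro (rfl | h)
      · simp; omega
      · have ha : a < j := by by_contra hc; simp [hc] at h
        simp
        omega
  | case3 =>
    intro hs hb j hj
    simp [show pvIntervals n [] = [] from rfl]

-- final assembly
set_option maxHeartbeats 1000000 in
theorem pv_main (lines : List String) :
    parse_code_block_lines lines = parse_code_block_lines_alt lines := by
  have hBdef : parse_code_block_lines_alt lines =
      PySem.Set.ofList ((PySem.List.pyRange 0 (lines.length : Int)).filter
        (fun i => (pvIntervals (lines.length : Int) (pvFenceIndices '-' lines) ++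
            pvIntervals (lines.length : Int) (pvFenceIndices '.' lines)).any
          (fun ab => decide (ab.1 ≤ i) && decide (i ≤ ab.2)))) := rfl
  have hFsort : ∀ ch : Char, (pvFenceIndices ch lines).Pairwise (· < ·) := fun ch => by
    rw [pvFenceIndices_eq]; exact (pvEfm_sorted ch lines 0).1
  have hFbound : ∀ ch : Char, ∀ x ∈ pvFenceIndices ch lines, x < (lines.length : Int) := by
    intro ch x hx
    rw [pvFenceIndices_eq] at hx
    have := (pvEfm_sorted ch lines 0).2 x hx
    omega
  have hcnt : ∀ (ch : Char) (k : Nat),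
      (pvFenceIndices ch lines).countP (fun x => decide (x < (k : Int))) =
        (lines.take k).countP (pvIsFence ch) := by
    intro ch k
    rw [pvFenceIndices_eq]
    rw [← pvEfm_count ch lines 0 k]
    apply List.countP_congr
    intro a _
    simp
  have hmemF : ∀ (ch : Char) (k : Nat), k < lines.length →
      ((k : Int) ∈ pvFenceIndices ch lines ↔ pvIsFence ch (lines.getD k "") = true) := by
    intro ch k hk
    rw [pvFenceIndices_eq, pvEfm_mem]
    constructor
    · rintro ⟨k', hk', hke, hf⟩
      have hkk : k = k' := by omega
      exact hkk ▸ hf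
    · intro hf
      exact ⟨k, hk, by push_cast; omega, hf⟩
  have hAmem : ∀ j : Int, j ∈ parse_code_block_lines lines ↔
      ∃ k : Nat, k < lines.length ∧ j = (k : Int) ∧ pvCond lines false false k := by
    intro j
    unfold parse_code_block_lines
    rw [pv_foldA_mem lines 0 PySem.Set.empty false false j]
    simp [PySem.Set.empty]
  have hAsort : (parse_code_block_lines lines).Pairwise (· < ·) := by
    unfold parse_code_block_lines
    exact pv_foldA_sorted lines 0 PySem.Set.empty false false (by simp [PySem.Set.empty])
      (by simp [PySem.Set.empty])
  have hnodup : ((PySem.List.pyRange 0 (lines.length : Int)).filter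
      (fun i => (pvIntervals (lines.length : Int) (pvFenceIndices '-' lines) ++
          pvIntervals (lines.length : Int) (pvFenceIndices '.' lines)).any
        (fun ab => decide (ab.1 ≤ i) && decide (i ≤ ab.2)))).Nodup :=
    (PySem.List.nodup_pyRange_one 0 _).filter _
  rw [hBdef, PySem.Set.ofList_eq_self_of_nodup _ hnodup]
  have hBsort : ((PySem.List.pyRange 0 (lines.length : Int)).filter
      (fun i => (pvIntervals (lines.length : Int) (pvFenceIndices '-' lines) ++
          pvIntervals (lines.length : Int) (pvFenceIndices '.' lines)).any
        (fun ab => decide (ab.1 ≤ i) && decide (i ≤ ab.2)))).Pairwise (· < ·) :=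
    (PySem.List.pairwise_lt_pyRange_one 0 _).filter _
  have hmem : ∀ j : Int, j ∈ parse_code_block_lines lines ↔
      j ∈ ((PySem.List.pyRange 0 (lines.length : Int)).filter
        (fun i => (pvIntervals (lines.length : Int) (pvFenceIndices '-' lines) ++
            pvIntervals (lines.length : Int) (pvFenceIndices '.' lines)).any
          (fun ab => decide (ab.1 ≤ i) && decide (i ≤ ab.2)))) := by
    intro j
    rw [hAmem j, List.mem_filter]
    constructor
    · rintro ⟨k, hk, rfl, hc⟩
      have hkn : (k : Int) < (lines.length : Int) := by exact_mod_cast hk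
      have hjr : (k : Int) ∈ PySem.List.pyRange 0 (lines.length : Int) := by
        rw [PySem.List.mem_pyRange_one]
        exact ⟨by positivity, hkn⟩
      refine ⟨hjr, ?_⟩
      rw [List.any_append, Bool.or_eq_true,
        pv_intervals_cover (lines.length : Int) _ (hFsort '-') (hFbound '-') (k : Int) hkn,
        pv_intervals_cover (lines.length : Int) _ (hFsort '.') (hFbound '.') (k : Int) hkn,
        hmemF '-' k hk, hmemF '.' k hk, hcnt '-' k, hcnt '.' k]
      unfold pvCond at hc
      simp only [Bool.false_xor, decide_eq_true_eq] at hc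
      rcases hc with h | h | h | h
      exacts [Or.inl (Or.inl h), Or.inr (Or.inl h), Or.inl (Or.inr h), Or.inr (Or.inr h)]
    · rintro ⟨hjr, hcov⟩
      rw [PySem.List.mem_pyRange_one] at hjr
      obtain ⟨hj0, hjn⟩ := hjr
      obtain ⟨k, rfl⟩ : ∃ k : Nat, j = (k : Int) := ⟨j.toNat, (Int.toNat_of_nonneg hj0).symm⟩
      have hk : k < lines.length := by exact_mod_cast hjn
      refine ⟨k, hk, rfl, ?_⟩
      rw [List.any_append, Bool.or_eq_true,
        pv_intervals_cover (lines.length : Int) _ (hFsort '-') (hFbound '-') (k : Int) hjn,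
        pv_intervals_cover (lines.length : Int) _ (hFsort '.') (hFbound '.') (k : Int) hjn,
        hmemF '-' k hk, hmemF '.' k hk, hcnt '-' k, hcnt '.' k] at hcov
      unfold pvCond
      simp only [Bool.false_xor, decide_eq_true_eq]
      rcases hcov with (h | h) | (h | h)
      exacts [Or.inl h, Or.inr (Or.inr (Or.inl h)), Or.inr (Or.inl h),
        Or.inr (Or.inr (Or.inr h))]
  have hperm : (parse_code_block_lines lines).Perm
      ((PySem.List.pyRange 0 (lines.length : Int)).filter
        (fun i => (pvIntervals (lines.length : Int) (pvFenceIndices '-' lines) ++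
            pvIntervals (lines.length : Int) (pvFenceIndices '.' lines)).any
          (fun ab => decide (ab.1 ≤ i) && decide (i ≤ ab.2)))) :=
    (List.perm_ext_iff_of_nodup (hAsort.imp ne_of_lt) (hBsort.imp ne_of_lt)).mpr hmem
  exact List.eq_of_perm_of_sorted (fun a b _ _ hab hba => le_antisymm hab hba)
    (hAsort.imp le_of_lt) (hBsort.imp le_of_lt) hperm

-- ===== VERDICT (by name: the statement is the Claim_ definition above) =====
theorem parse_code_block_lines_spec : Claim_equal_parse_code_block_lines := by
  unfold Claim_equal_parse_code_block_lines
  intro lines _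
  unfold Spec_parse_code_block_lines
  exact pv_main lines
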